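/- GENERATED by mk_final_copies.py from the proof of the farm's unit `vorbis_decode_packet_rest.1a` (farm:vorbis_decode_packet_rest.1a.1: Lemmas.lean) as the
   re-elaboration sweep compiled it — do not edit. -/
import Asan.CheckWalk
import Vorbis.Spec.Units.vorbis_decode_packet_rest_1a
import Vorbis.Spec.PacketRestFrame

open X86 X86.User Asan Vorbis Vorbis.Spec Vorbis.Spec.vorbis_decode_packet_rest

set_option maxRecDepth 4000
set_option maxHeartbeats 4000000

namespace Vorbis.Spec.vorbis_decode_packet_rest_1a

/-- **Segment .1a, 0x110b00–0x110bd0 → 0x110bda** (line 3208): six pushes, `sub rsp, 0xb88`, the five spills, the three words of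
the frame header, `SB = (rsp + 0x80) >> 3` and the twelve poison stores. The memory after them is `storesMem` of the frame's
`prologue` list over the memory after the stack stores: `ShadowInv.prologue_ra`. -/
theorem prologue_walk (Lay : Layout) (hLay : Lay.hi = 0x1000000) (μ : Microarch) (hμ : UserX.MicroOK μ) (u₀ : State)
    (hcode : HasCodeNat Lay u₀ Vorbis.L.vorbis_decode_packet_rest.entry Vorbis.Code.code_vorbis_decode_packet_rest.nat
      Vorbis.L.vorbis_decode_packet_rest.size)
    (others : List Obj) (frames : List (Nat × FrameLayout)) (len : Nat) (Ar : Arena) (stored room : Int)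
    (mode : Nat) (ysz : Nat → Nat) (u : State) (ret : Word)
    (he : AtEntry (Vorbis.conv u₀) Vorbis.L.vorbis_decode_packet_rest.entry 3856 ret u)
    (hpre : (vorbis_decode_packet_rest.spec others frames len Ar stored room mode ysz).pre u) :
    ReachVia Lay μ Vorbis.WayInv u (fun w => At1b u₀ others frames len Ar stored room mode ysz u ret w) := by
  have he0 := he
  have hpre0 := hpre
  v_entry he
  obtain ⟨hsh, hinv, hargs⟩ := hpre
  have hsp := hsh.rsp
  -- 0x110b00 … 0x110bd0: the walk
  u_walk hcode [hμ.vendor] until [Vorbis.L.vorbis_decode_packet_rest.at_110bda] span [Vorbis.L.textLo, Vorbis.L.textHi] side (v_side)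
  -- the memory before the poison stores: fourteen stores into the stack area
  obtain ⟨M0, hM0⟩ : ∃ M0 : Mem, M0 = (((((((((((((u.mem.writeLE (u.reg .rsp - 8) 8 (u.reg .r15).toNat).writeLE
      (u.reg .rsp - 16) 8 (u.reg .r14).toNat).writeLE (u.reg .rsp - 24) 8 (u.reg .r13).toNat).writeLE
      (u.reg .rsp - 32) 8 (u.reg .r12).toNat).writeLE (u.reg .rsp - 40) 8 (u.reg .rbp).toNat).writeLE
      (u.reg .rsp - 48) 8 (u.reg .rbx).toNat).writeLE (u.reg .rsp - 2936) 8 (u.reg .rdi).toNat).writeLE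
      (u.reg .rsp - 2896) 8 (u.reg .rsi).toNat).writeLE (u.reg .rsp - 2888) 8 (u.reg .rdx).toNat).writeLE
      (u.reg .rsp - 2880) 4 (Word.part .w32 (u.reg .rcx)).toNat).writeLE
      (u.reg .rsp - 2876) 4 (Word.part .w32 (u.reg .r9)).toNat).writeLE
      (u.reg .rsp - 2872) 8 1102416563).writeLE (u.reg .rsp - 2864) 8 1182688).writeLE (u.reg .rsp - 2856) 8 1116928 :=
    ⟨_, rfl⟩
  have hun0 : ShadowUntouched u.mem M0 := by
    rw [hM0]
    v_untouched
  have hinv0 : ShadowInv others frames ((u.reg .rsp).toNat + 8) M0 := hsh.inv.untouched hun0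
  -- the twelve poison stores: SH4's prologue step
  have hinv1 := hinv0.prologue_ra Vorbis.Frames.vorbis_decode_packet_rest_ok he_align
    (top' := (u.reg .rsp).toNat - 3000) (by simp only [Vorbis.Frames.vorbis_decode_packet_rest]; omega) (by omega) (by omega)
  have hmemP : storesMem M0 (((u.reg .rsp).toNat - 2872) / 8) Vorbis.Frames.vorbis_decode_packet_rest.prologue
      = s_110bd0.mem := by
    rw [w_mem, ← hM0]
    unfold storesMem
    simp only [Vorbis.Frames.vorbis_decode_packet_rest, List.foldl]
    rw [shadowAddr_ownFrame (u.reg .rsp) 12582912 0 rfl he_room he_top,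
      shadowAddr_ownFrame (u.reg .rsp) 12582932 20 rfl he_room he_top,
      shadowAddr_ownFrame (u.reg .rsp) 12582968 56 rfl he_room he_top,
      shadowAddr_ownFrame (u.reg .rsp) 12582972 60 rfl he_room he_top,
      shadowAddr_ownFrame (u.reg .rsp) 12583104 192 rfl he_room he_top,
      shadowAddr_ownFrame (u.reg .rsp) 12583108 196 rfl he_room he_top,
      shadowAddr_ownFrame (u.reg .rsp) 12583112 200 rfl he_room he_top,
      shadowAddr_ownFrame (u.reg .rsp) 12583116 204 rfl he_room he_top,
      shadowAddr_ownFrame (u.reg .rsp) 12583248 336 rfl he_room he_top,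
      shadowAddr_ownFrame (u.reg .rsp) 12583252 340 rfl he_room he_top,
      shadowAddr_ownFrame (u.reg .rsp) 12583256 344 rfl he_room he_top,
      shadowAddr_ownFrame (u.reg .rsp) 12583260 348 rfl he_room he_top]
  have hspOf : (spOf u).toNat = (u.reg .rsp).toNat - 3000 := by
    u_omega
  have hinvP : ShadowInv others (framesIn frames u) (spOf u).toNat s_110bd0.mem := by
    rw [hspOf, ← hmemP]
    exact hinv1
  -- the poison stores wrote 352 shadow bytes and nothing else
  have hs01 : Mem.SameExcept [⟨0xC00000 + ((u.reg .rsp).toNat - 2872) / 8, 0xC00000 + ((u.reg .rsp).toNat - 2872) / 8 + 352⟩]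
      M0 s_110bd0.mem := by
    rw [← hmemP]
    exact storesMem_sameExcept M0 _ 352 _ (by decide) (by omega)
  have hsameP : Mem.SameExcept [⟨(u.reg .rsp).toNat - 3856, (u.reg .rsp).toNat⟩,
      ⟨0xC00000 + ((u.reg .rsp).toNat - 3856) / 8, 0xC00000 + ((u.reg .rsp).toNat + 7) / 8⟩] u.mem s_110bd0.mem := by
    u_same
  have hdf : s_110bd0.flags .df = false := by
    rw [w_flags]
    simp only [X86.User.df_setStatus]
    exact he_df
  have hmx : s_110bd0.mxcsr &&& 0x1F80 = 0x1F80 := by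
    rw [w_mxcsr]
    exact he_mx
  clear hinv1 hmemP hinv0 hun0 w_mem w_flags
  -- the assertion at 0x110bda: the slots are read in `M0`, below the shadow
  refine ReachVia.done ⟨he0, hpre0, w_rip, w_rsp, w_r13, w_r14, w_r15, w_kept.get .rdx rfl, w_eq, hdf, hmx,
    hsameP, hinvP, ?_, ?_, ?_, ?_, ?_, ?_, ?_, ?_, ?_, ?_, ?_, ?_⟩
  -- the return address: no store met its slot
  · rw [readLE_below_ownShadow _ _ _ hs01 _ _ (by u_omega), hM0]
    u_frame he_retAddr
  -- the six saved registers
  · have h : M0.readLE (u.reg .rsp - 8) 8 = (u.reg .r15).toNat := by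
      rw [hM0]
      u_read
    rw [readLE_below_ownShadow _ _ _ hs01 _ _ (by u_omega), h]
    exact UInt64.ofNat_toNat
  · have h : M0.readLE (u.reg .rsp - 16) 8 = (u.reg .r14).toNat := by
      rw [hM0]
      u_read
    rw [readLE_below_ownShadow _ _ _ hs01 _ _ (by u_omega), h]
    exact UInt64.ofNat_toNat
  · have h : M0.readLE (u.reg .rsp - 24) 8 = (u.reg .r13).toNat := by
      rw [hM0]
      u_read
    rw [readLE_below_ownShadow _ _ _ hs01 _ _ (by u_omega), h]
    exact UInt64.ofNat_toNat
  · have h : M0.readLE (u.reg .rsp - 32) 8 = (u.reg .r12).toNat := by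
      rw [hM0]
      u_read
    rw [readLE_below_ownShadow _ _ _ hs01 _ _ (by u_omega), h]
    exact UInt64.ofNat_toNat
  · have h : M0.readLE (u.reg .rsp - 40) 8 = (u.reg .rbp).toNat := by
      rw [hM0]
      u_read
    rw [readLE_below_ownShadow _ _ _ hs01 _ _ (by u_omega), h]
    exact UInt64.ofNat_toNat
  · have h : M0.readLE (u.reg .rsp - 48) 8 = (u.reg .rbx).toNat := by
      rw [hM0]
      u_read
    rw [readLE_below_ownShadow _ _ _ hs01 _ _ (by u_omega), h]
    exact UInt64.ofNat_toNat
  -- the five spill slots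
  · rw [readLE_below_ownShadow _ _ _ hs01 _ _ (by u_omega), hM0]
    u_read
  · rw [readLE_below_ownShadow _ _ _ hs01 _ _ (by u_omega), hM0]
    u_read
  · rw [readLE_below_ownShadow _ _ _ hs01 _ _ (by u_omega), hM0]
    u_read
  · rw [readLE_below_ownShadow _ _ _ hs01 _ _ (by u_omega), hM0]
    iterate 4 (rw [X86.User.Mem.readLE_writeLE_disjoint_noWrap _ _ _ _ _ _ (by u_omega) (by u_omega) (by u_omega)])
    rw [X86.User.Mem.readLE_writeLE_same _ _ _ _ (by decide), Vorbis.toNat_part32]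
    omega
  · rw [readLE_below_ownShadow _ _ _ hs01 _ _ (by u_omega), hM0]
    iterate 3 (rw [X86.User.Mem.readLE_writeLE_disjoint_noWrap _ _ _ _ _ _ (by u_omega) (by u_omega) (by u_omega)])
    rw [X86.User.Mem.readLE_writeLE_same _ _ _ _ (by decide), Vorbis.toNat_part32]
    omega

end Vorbis.Spec.vorbis_decode_packet_rest_1a
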